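-- pv_equiv track=rewrite | github.com/zdodds/contributed-submissions | submissions_ist341_sp2025/final|Copy_of_CGU_Week2_Strings,_Slicing,_and_Functions (2).py | letterScore
-- ===== SOURCE A (Python) =====
-- def letterScore(s):
--   scrabble_scores = {
--       1: {'A', 'E', 'I', 'O', 'U', 'L', 'N', 'R', 'S', 'T'},
--       2: {'D','G'},
--       3: {'B','C','M', 'P'},
--       4: {'F','H','V','W','Y'},
--       5: {'K'},
--       8: {'J','X'},
--       10: {'Q', 'Z'}
--   }
--
--   s = s.upper()
--
--   for score, letters in scrabble_scores.items():
--     if s in letters: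
--         return score
--   return 0
-- ===== SOURCE B (Python) =====
-- _SCORES = {
--     'A': 1, 'B': 3, 'C': 3, 'D': 2, 'E': 1, 'F': 4, 'G': 2,
--     'H': 4, 'I': 1, 'J': 8, 'K': 5, 'L': 1, 'M': 3, 'N': 1,
--     'O': 1, 'P': 3, 'Q': 10, 'R': 1, 'S': 1, 'T': 1, 'U': 1,
--     'V': 4, 'W': 4, 'X': 8, 'Y': 4, 'Z': 10,
-- }
--
-- def letterScore(s):
--   return _SCORES.get(s.upper(), 0)
-- ===== Notes on version B (the rewrite author's own statement) =====
-- stated objective: simpler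
-- what changed: Replaced the loop over seven score->letter-set groups with one flat letter->score dict built once at module level; the body is a single .get with default 0, no loop and no membership branch.
import Mathlib
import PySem

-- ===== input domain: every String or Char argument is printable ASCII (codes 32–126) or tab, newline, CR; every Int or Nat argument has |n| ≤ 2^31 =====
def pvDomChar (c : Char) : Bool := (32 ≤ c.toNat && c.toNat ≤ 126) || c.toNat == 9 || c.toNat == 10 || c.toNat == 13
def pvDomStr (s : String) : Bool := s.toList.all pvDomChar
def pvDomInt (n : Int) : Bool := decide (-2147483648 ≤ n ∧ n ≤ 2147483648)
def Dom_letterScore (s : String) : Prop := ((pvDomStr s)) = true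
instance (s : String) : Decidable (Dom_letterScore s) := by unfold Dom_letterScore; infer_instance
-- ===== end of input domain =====

-- B replaces A's loop over seven score→letter-set groups by a single lookup in a flat letter→score table (objective: simpler).

-- ===== PORT A =====
-- the for-loop over scrabble_scores.items() with its early return
def letterScoreLoop (s : String) : List (Int × PySem.Set String) → Int
  | [] => 0
  | (score, letters) :: rest =>
      if PySem.Set.contains letters s then score else letterScoreLoop s rest

def letterScore (s : String) : Int :=
  let scrabble_scores : List (Int × PySem.Set String) :=
    [(1, PySem.Set.ofList ["A", "E", "I", "O", "U", "L", "N", "R", "S", "T"]),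
     (2, PySem.Set.ofList ["D", "G"]),
     (3, PySem.Set.ofList ["B", "C", "M", "P"]),
     (4, PySem.Set.ofList ["F", "H", "V", "W", "Y"]),
     (5, PySem.Set.ofList ["K"]),
     (8, PySem.Set.ofList ["J", "X"]),
     (10, PySem.Set.ofList ["Q", "Z"])]
  let s := PySem.Str.upper s
  letterScoreLoop s scrabble_scores

-- ===== PORT B =====
def pvScoreTable : PySem.Dict String Int :=
  PySem.Dict.ofList
    [("A", 1), ("B", 3), ("C", 3), ("D", 2), ("E", 1), ("F", 4), ("G", 2),
     ("H", 4), ("I", 1), ("J", 8), ("K", 5), ("L", 1), ("M", 3), ("N", 1),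
     ("O", 1), ("P", 3), ("Q", 10), ("R", 1), ("S", 1), ("T", 1), ("U", 1),
     ("V", 4), ("W", 4), ("X", 8), ("Y", 4), ("Z", 10)]

def letterScore_alt (s : String) : Int :=
  pvScoreTable.getD (PySem.Str.upper s) 0

-- ===== PRECONDITION & SPEC =====
def Spec_letterScore (s : String) (out : Int) : Prop := out = letterScore_alt s
instance (s : String) (out : Int) : Decidable (Spec_letterScore s out) := by unfold Spec_letterScore; infer_instance

-- ===== CLAIM (what is proved, stated in full; the proofs are below) =====
def Claim_equal_letterScore : Prop := ∀ (s : String), Dom_letterScore s → Spec_letterScore s (letterScore s)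

-- ===== LEMMAS AND PROOFS =====
-- both programs depend on the input only through s.upper(); for an arbitrary string u the
-- loop over the seven groups and the flat-table lookup agree
lemma pvScoreTable_eq : pvScoreTable = PySem.Dict.mk
    [("A", 1), ("B", 3), ("C", 3), ("D", 2), ("E", 1), ("F", 4), ("G", 2),
     ("H", 4), ("I", 1), ("J", 8), ("K", 5), ("L", 1), ("M", 3), ("N", 1),
     ("O", 1), ("P", 3), ("Q", 10), ("R", 1), ("S", 1), ("T", 1), ("U", 1),
     ("V", 4), ("W", 4), ("X", 8), ("Y", 4), ("Z", 10)] := by decide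

lemma letterScore_core (u : String) :
    letterScoreLoop u
      [(1, PySem.Set.ofList ["A", "E", "I", "O", "U", "L", "N", "R", "S", "T"]),
       (2, PySem.Set.ofList ["D", "G"]),
       (3, PySem.Set.ofList ["B", "C", "M", "P"]),
       (4, PySem.Set.ofList ["F", "H", "V", "W", "Y"]),
       (5, PySem.Set.ofList ["K"]),
       (8, PySem.Set.ofList ["J", "X"]),
       (10, PySem.Set.ofList ["Q", "Z"])] = pvScoreTable.getD u 0 := by
  by_cases h : u ∈ (["A","B","C","D","E","F","G","H","I","J","K","L","M",
      "N","O","P","Q","R","S","T","U","V","W","X","Y","Z"] : List String)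
  · fin_cases h <;> decide
  · simp only [List.mem_cons, List.not_mem_nil, or_false, not_or] at h
    obtain ⟨hA,hB,hC,hD,hE,hF,hG,hH,hI,hJ,hK,hL,hM,hN,hO,hP,hQ,hR,hS,hT,hU,hV,hW,hX,hY,hZ⟩ := h
    simp [letterScoreLoop, pvScoreTable_eq, PySem.Set.contains, PySem.Set.ofList,
      PySem.Dict.getD, PySem.Dict.get?,
      hA,hB,hC,hD,hE,hF,hG,hH,hI,hJ,hK,hL,hM,hN,hO,hP,hQ,hR,hS,hT,hU,hV,hW,hX,hY,hZ,
      Ne.symm hA, Ne.symm hB, Ne.symm hC, Ne.symm hD, Ne.symm hE, Ne.symm hF, Ne.symm hG,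
      Ne.symm hH, Ne.symm hI, Ne.symm hJ, Ne.symm hK, Ne.symm hL, Ne.symm hM, Ne.symm hN,
      Ne.symm hO, Ne.symm hP, Ne.symm hQ, Ne.symm hR, Ne.symm hS, Ne.symm hT, Ne.symm hU,
      Ne.symm hV, Ne.symm hW, Ne.symm hX, Ne.symm hY, Ne.symm hZ]

-- ===== VERDICT (by name: the statement is the Claim_ definition above) =====
theorem letterScore_spec : Claim_equal_letterScore := by
  intro s _
  unfold Spec_letterScore letterScore letterScore_alt
  exact letterScore_core (PySem.Str.upper s)
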